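-- pv_equiv track=rewrite | github.com/Rodrigo30406/facial-recognition-lab | src/eleccia_vision/application/quality_gate.py | next_target_bucket
-- ===== SOURCE A (Python) =====
-- from typing import Literal
--
-- AngleBucket = Literal["center", "left", "right", "up", "down"]
--
-- _ANGLE_ORDER: tuple[AngleBucket, ...] = ("center", "left", "right", "up", "down")
--
-- def next_target_bucket(
--     captured_by_bucket: dict[AngleBucket, int], plan_by_bucket: dict[AngleBucket, int]
-- ) -> AngleBucket | None:
--     remaining: list[tuple[int, int, AngleBucket]] = []
--     for idx, bucket in enumerate(_ANGLE_ORDER):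
--         deficit = plan_by_bucket.get(bucket, 0) - captured_by_bucket.get(bucket, 0)
--         if deficit > 0:
--             remaining.append((deficit, -idx, bucket))
--     if not remaining:
--         return None
--     remaining.sort(reverse=True)
--     return remaining[0][2]
-- ===== SOURCE B (Python) =====
-- _ANGLE_ORDER = ("center", "left", "right", "up", "down")
--
-- def next_target_bucket(captured_by_bucket, plan_by_bucket):
--     best_deficit = 0
--     best_bucket = None
--     for bucket in _ANGLE_ORDER:
--         deficit = plan_by_bucket.get(bucket, 0) - captured_by_bucket.get(bucket, 0)
--         if deficit > best_deficit:
--             best_deficit = deficit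
--             best_bucket = bucket
--     return best_bucket
-- ===== Notes on version B (the rewrite author's own statement) =====
-- stated objective: simpler
-- what changed: Replaced A's build-a-(deficit,-idx,bucket)-list, reverse-sort and take-head with a single strict-'>' max-tracking scan over the fixed bucket order (best_deficit starts at 0, so no positive deficit yields None and ties keep the earliest bucket).
import Mathlib
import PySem

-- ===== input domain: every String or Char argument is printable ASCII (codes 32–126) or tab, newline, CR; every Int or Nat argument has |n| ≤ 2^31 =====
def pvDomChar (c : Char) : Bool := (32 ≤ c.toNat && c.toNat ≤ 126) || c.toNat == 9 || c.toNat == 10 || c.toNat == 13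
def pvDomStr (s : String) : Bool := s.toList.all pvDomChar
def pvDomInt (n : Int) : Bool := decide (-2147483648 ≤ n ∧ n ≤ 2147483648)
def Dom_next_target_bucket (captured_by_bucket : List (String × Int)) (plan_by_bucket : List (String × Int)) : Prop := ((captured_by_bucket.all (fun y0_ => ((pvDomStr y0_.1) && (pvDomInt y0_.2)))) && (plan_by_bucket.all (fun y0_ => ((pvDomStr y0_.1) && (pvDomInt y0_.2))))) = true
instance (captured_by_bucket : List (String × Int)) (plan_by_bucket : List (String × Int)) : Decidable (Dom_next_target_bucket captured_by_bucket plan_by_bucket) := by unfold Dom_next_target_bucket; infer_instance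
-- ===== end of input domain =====

-- B replaces A's build-list-then-sort-descending with a single strict-'>' max-tracking scan over the fixed bucket order (objective: simpler; same O(1)-sized input, no speed claim).

-- ===== PORT A =====
def pyAngleOrder : List String := ["center", "left", "right", "up", "down"]

def pyDictGetD (d : List (String × Int)) (k : String) : Int :=
  match d.find? (fun p => p.1 == k) with
  | some p => p.2
  | none => 0

-- Python sorts the (deficit, -idx, bucket) triples lexicographically; the -idx components are
-- pairwise distinct, so the String third component is never compared: sorted2 on the first two
-- keys is exact here.
def next_target_bucket (captured_by_bucket : List (String × Int)) (plan_by_bucket : List (String × Int)) : Option String :=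
  let remaining : List (Int × Int × String) :=
    (PySem.List.enumerate pyAngleOrder 0).foldl (fun acc p =>
      let deficit := pyDictGetD plan_by_bucket p.2 - pyDictGetD captured_by_bucket p.2
      if deficit > 0 then acc ++ [(deficit, -p.1, p.2)] else acc) []
  if remaining = [] then none
  else
    match PySem.List.sorted2 remaining (fun t => t.1) (fun t => t.2.1) true with
    | [] => none
    | t :: _ => some t.2.2

-- ===== PORT B =====
def next_target_bucket_alt (captured_by_bucket : List (String × Int)) (plan_by_bucket : List (String × Int)) : Option String :=
  (pyAngleOrder.foldl (fun (st : Int × Option String) b =>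
     let deficit := pyDictGetD plan_by_bucket b - pyDictGetD captured_by_bucket b
     if deficit > st.1 then (deficit, some b) else st) (0, none)).2

-- ===== PRECONDITION & SPEC =====
def Spec_next_target_bucket (captured_by_bucket : List (String × Int)) (plan_by_bucket : List (String × Int)) (out : Option String) : Prop := out = next_target_bucket_alt captured_by_bucket plan_by_bucket
instance (captured_by_bucket : List (String × Int)) (plan_by_bucket : List (String × Int)) (out : Option String) : Decidable (Spec_next_target_bucket captured_by_bucket plan_by_bucket out) := by unfold Spec_next_target_bucket; infer_instance

-- ===== CLAIM =====
def Claim_equal_next_target_bucket : Prop := ∀ (captured_by_bucket : List (String × Int)) (plan_by_bucket : List (String × Int)), Dom_next_target_bucket captured_by_bucket plan_by_bucket → Spec_next_target_bucket captured_by_bucket plan_by_bucket (next_target_bucket captured_by_bucket plan_by_bucket)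

-- ===== LEMMAS AND PROOFS =====
-- head of an insertBy-fold is the running "before"-max
theorem head?_foldl_insertBy {α : Type} (before : α → α → Bool) :
    ∀ (xs : List α) (acc : List α),
      (xs.foldl (fun a x => PySem.List.insertBy before x a) acc).head? =
      xs.foldl (fun h? x => match h? with
        | none => some x
        | some h => if before x h then some x else some h) acc.head? := by
  intro xs
  induction xs with
  | nil => intro acc; rfl
  | cons x xs ih =>
    intro acc
    simp only [List.foldl]
    rw [ih]
    congr 1
    cases acc with
    | nil => rfl
    | cons y ys =>
      simp only [PySem.List.insertBy]
      by_cases hb : before x y <;> simp [hb]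

abbrev T3 := Int × Int × String

def lexStep (h? : Option T3) (x : T3) : Option T3 :=
  match h? with
  | none => some x
  | some h => if (decide (h.1 < x.1) || (!decide (x.1 < h.1) && decide (h.2.1 < x.2.1))) then some x else some h

def InvAB (i : Int) (h? : Option T3) (st : Int × Option String) : Prop :=
  (h? = none ∧ st = (0, none)) ∨
  (∃ d j b, h? = some (d, -j, b) ∧ st = (d, some b) ∧ 0 < d ∧ 0 ≤ j ∧ j < i)

theorem InvAB_mono {i i' : Int} {h? : Option T3} {st : Int × Option String}
    (hle : i ≤ i') (h : InvAB i h? st) : InvAB i' h? st := by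
  rcases h with ⟨h1, h2⟩ | ⟨d, j, b, h1, h2, h3, h4, h5⟩
  · exact Or.inl ⟨h1, h2⟩
  · exact Or.inr ⟨d, j, b, h1, h2, h3, h4, by omega⟩

theorem main_ind (df : String → Int) :
    ∀ (bs : List String) (i : Int) (h? : Option T3) (st : Int × Option String),
      0 ≤ i → InvAB i h? st →
      InvAB (i + bs.length)
        ((((PySem.List.enumerate bs i).filter (fun p => decide (0 < df p.2))).map
            (fun p => ((df p.2, -p.1, p.2) : T3))).foldl lexStep h?)
        (bs.foldl (fun st b => if df b > st.1 then (df b, some b) else st) st) := by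
  intro bs
  induction bs with
  | nil => intro i h? st hi hinv; simpa using hinv
  | cons b bs ih =>
    intro i h? st hi hinv
    rw [PySem.List.enumerate_cons]
    simp only [List.filter, List.foldl, List.length_cons]
    by_cases hd : 0 < df b
    · simp only [hd, decide_true, List.map, List.foldl]
      have hstep : InvAB (i + 1) (lexStep h? (df b, -i, b))
          (if df b > st.1 then (df b, some b) else st) := by
        rcases hinv with ⟨h1, h2⟩ | ⟨d, j, bb, h1, h2, hdpos, hj0, hji⟩
        · subst h1; subst h2
          simp only [lexStep, hd]
          right; exact ⟨df b, i, b, by simp, rfl, hd, hi, by omega⟩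
        · subst h1; subst h2
          simp only [lexStep, gt_iff_lt]
          by_cases hlt : d < df b
          · have : (decide (d < df b) || (!decide (df b < d) && decide (-j < -i))) = true := by
              simp [hlt]
            rw [if_pos this, if_pos hlt]
            right; exact ⟨df b, i, b, rfl, rfl, hd, hi, by omega⟩
          · have hni : ¬ (-j < -i) := by omega
            have : (decide (d < df b) || (!decide (df b < d) && decide (-j < -i))) = false := by
              rw [decide_eq_false hlt, decide_eq_false hni]; simp
            rw [if_neg (ne_true_of_eq_false this), if_neg hlt]
            right; exact ⟨d, j, bb, rfl, rfl, hdpos, hj0, by omega⟩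
      have := ih (i+1) _ _ (by omega) hstep
      rw [show i + ((bs.length + 1 : Nat) : Int) = (i+1) + (bs.length : Int) by push_cast; ring]
      exact this
    · simp only [hd, decide_false]
      have hnostep : (if df b > st.1 then (df b, some b) else st) = st := by
        rcases hinv with ⟨_, h2⟩ | ⟨d, j, bb, _, h2, hdpos, _, _⟩ <;> subst h2 <;>
          simp only [gt_iff_lt] <;> rw [if_neg (by omega)]
      rw [hnostep]
      have := ih (i+1) h? st (by omega) (InvAB_mono (by omega) hinv)
      rw [show i + ((bs.length + 1 : Nat) : Int) = (i+1) + (bs.length : Int) by push_cast; ring]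
      exact this

theorem eqv (c p : List (String × Int)) : next_target_bucket c p = next_target_bucket_alt c p := by
  unfold next_target_bucket next_target_bucket_alt
  set df : String → Int := fun b => pyDictGetD p b - pyDictGetD c b with hdf
  have hrem : ((PySem.List.enumerate pyAngleOrder 0).foldl (fun acc q =>
      if df q.2 > 0 then acc ++ [((df q.2, -q.1, q.2) : T3)] else acc) []) =
      ((PySem.List.enumerate pyAngleOrder 0).filter (fun q => decide (0 < df q.2))).map
        (fun q => ((df q.2, -q.1, q.2) : T3)) := by
    rw [PySem.List.foldl_append_ite]
    simp only [List.nil_append]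
  simp only []
  rw [hrem]
  set rem : List T3 := ((PySem.List.enumerate pyAngleOrder 0).filter (fun q => decide (0 < df q.2))).map
        (fun q => ((df q.2, -q.1, q.2) : T3)) with hremdef
  have hsorted : (PySem.List.sorted2 rem (fun t => t.1) (fun t => t.2.1) true).head? =
      rem.foldl lexStep none := by
    simp only [PySem.List.sorted2]
    rw [head?_foldl_insertBy]
    simp only [if_true]
    congr 1
    funext h? x
    cases h? <;> rfl
  have hmain := main_ind df pyAngleOrder 0 none (0, none) (le_refl 0) (Or.inl ⟨rfl, rfl⟩)
  rw [← hremdef] at hmain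
  rcases hmain with ⟨h1, h2⟩ | ⟨d, j, b, h1, h2, hdpos, hj0, hji⟩
  · -- fold is none: sorted2 head? none, so rem = []
    rw [h1] at hsorted
    have hnil : PySem.List.sorted2 rem (fun t => t.1) (fun t => t.2.1) true = [] := by
      cases hh : PySem.List.sorted2 rem (fun t => t.1) (fun t => t.2.1) true with
      | nil => rfl
      | cons a l => rw [hh] at hsorted; simp at hsorted
    have : rem = [] := by
      have := PySem.List.sorted2_perm rem (fun t => t.1) (fun t => t.2.1) true
      rw [hnil] at this
      exact (List.Perm.nil_eq this).symm
    rw [h2, if_pos this]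
  · rw [h1] at hsorted
    have hne : rem ≠ [] := by
      intro hn
      rw [hn] at hsorted
      simp [PySem.List.sorted2] at hsorted
    rw [if_neg hne, h2]
    cases hh : PySem.List.sorted2 rem (fun t => t.1) (fun t => t.2.1) true with
    | nil => rw [hh] at hsorted; simp at hsorted
    | cons a l =>
      rw [hh] at hsorted
      simp only [List.head?] at hsorted
      cases hsorted
      rfl

-- ===== VERDICT =====
theorem next_target_bucket_spec : Claim_equal_next_target_bucket := by
  intro c p _
  unfold Spec_next_target_bucket
  exact eqv c p
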